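-- pv_equiv track=rewrite | github.com/Nexa-HT/VwaNou | backend/app/routers/incidents.py | _estimate_urgency
-- ===== SOURCE A (Python) =====
-- def _estimate_urgency(description: str) -> int:
--     lowered = description.lower()
--     high_keywords = {"fire", "gun", "collapse", "shot", "flood", "injury", "explosion"}
--     medium_keywords = {"protest", "blocked", "accident", "smoke", "violence"}
--
--     if any(keyword in lowered for keyword in high_keywords):
--         return 3
--     if any(keyword in lowered for keyword in medium_keywords):
--         return 2
--     return 1
-- ===== SOURCE B (Python) =====
-- def _estimate_urgency(description: str) -> int:
--     lowered = description.lower()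
--     levels = {
--         "fire": 3, "gun": 3, "collapse": 3, "shot": 3,
--         "flood": 3, "injury": 3, "explosion": 3,
--         "protest": 2, "blocked": 2, "accident": 2,
--         "smoke": 2, "violence": 2,
--     }
--     result = 1
--     for keyword, level in levels.items():
--         if keyword in lowered:
--             result = max(result, level)
--     return result
-- ===== Notes on version B (the rewrite author's own statement) =====
-- stated objective: alternative
-- what changed: Replaces the two short-circuiting any() guards with an early return per tier by a single keyword->level table scanned once, accumulating result = max(result, level).
import Mathlib
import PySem

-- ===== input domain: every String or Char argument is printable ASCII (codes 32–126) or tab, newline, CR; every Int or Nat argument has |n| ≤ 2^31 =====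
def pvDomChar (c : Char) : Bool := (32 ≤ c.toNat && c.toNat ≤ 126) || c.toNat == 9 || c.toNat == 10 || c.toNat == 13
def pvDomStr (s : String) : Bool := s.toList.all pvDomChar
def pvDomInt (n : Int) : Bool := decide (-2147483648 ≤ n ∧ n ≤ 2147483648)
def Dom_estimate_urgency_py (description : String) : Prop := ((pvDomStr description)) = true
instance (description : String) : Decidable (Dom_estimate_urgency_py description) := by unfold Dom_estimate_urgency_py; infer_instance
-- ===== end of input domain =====

-- ===== PORT A =====
-- B replaces A's two any() tier checks by a single pass over a keyword->level table, accumulating a max (alternative decomposition, same cost).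
def estimate_urgency_py (description : String) : Int :=
  let lowered := PySem.Str.lower description
  let high_keywords : List String := ["fire", "gun", "collapse", "shot", "flood", "injury", "explosion"]
  let medium_keywords : List String := ["protest", "blocked", "accident", "smoke", "violence"]
  if high_keywords.any (fun keyword => PySem.Str.isIn keyword lowered) then 3
  else if medium_keywords.any (fun keyword => PySem.Str.isIn keyword lowered) then 2
  else 1

-- ===== PORT B =====
def estimate_urgency_py_alt (description : String) : Int :=
  let lowered := PySem.Str.lower description
  let levels : List (String × Int) :=
    [("fire", 3), ("gun", 3), ("collapse", 3), ("shot", 3), ("flood", 3), ("injury", 3), ("explosion", 3),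
     ("protest", 2), ("blocked", 2), ("accident", 2), ("smoke", 2), ("violence", 2)]
  levels.foldl (fun result kl => if PySem.Str.isIn kl.1 lowered then max result kl.2 else result) 1

-- ===== PRECONDITION & SPEC =====
def Spec_estimate_urgency_py (description : String) (out : Int) : Prop := out = estimate_urgency_py_alt description
instance (description : String) (out : Int) : Decidable (Spec_estimate_urgency_py description out) := by unfold Spec_estimate_urgency_py; infer_instance

-- ===== CLAIM (what is proved, stated in full; the proofs are below) =====
def Claim_equal_estimate_urgency_py : Prop := ∀ (description : String), Dom_estimate_urgency_py description → Spec_estimate_urgency_py description (estimate_urgency_py description)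

-- ===== LEMMAS AND PROOFS =====

-- ===== VERDICT (by name: the statement is the Claim_ definition above) =====
theorem estimate_urgency_py_spec : Claim_equal_estimate_urgency_py := by
  intro d _
  unfold Spec_estimate_urgency_py estimate_urgency_py estimate_urgency_py_alt
  simp only [List.any_cons, List.any_nil, Bool.or_false, List.foldl_cons, List.foldl_nil]
  generalize PySem.Str.isIn "fire" (PySem.Str.lower d) = b1
  generalize PySem.Str.isIn "gun" (PySem.Str.lower d) = b2
  generalize PySem.Str.isIn "collapse" (PySem.Str.lower d) = b3
  generalize PySem.Str.isIn "shot" (PySem.Str.lower d) = b4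
  generalize PySem.Str.isIn "flood" (PySem.Str.lower d) = b5
  generalize PySem.Str.isIn "injury" (PySem.Str.lower d) = b6
  generalize PySem.Str.isIn "explosion" (PySem.Str.lower d) = b7
  generalize PySem.Str.isIn "protest" (PySem.Str.lower d) = b8
  generalize PySem.Str.isIn "blocked" (PySem.Str.lower d) = b9
  generalize PySem.Str.isIn "accident" (PySem.Str.lower d) = b10
  generalize PySem.Str.isIn "smoke" (PySem.Str.lower d) = b11
  generalize PySem.Str.isIn "violence" (PySem.Str.lower d) = b12
  revert b1 b2 b3 b4 b5 b6 b7 b8 b9 b10 b11 b12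
  decide
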